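-- pv_equiv track=rewrite | github.com/VitorFonseca123/TelefonePhyton | NumeroTelefone.py | isCellNumber
-- ===== SOURCE A (Python) =====
-- def isCellNumber(text):
--     if len(text) != 10:
--         return False
--     for i in range(0, 5):
--         if not text[i].isdecimal():
--             return False
--         if text[5] != '-':
--             return False
--     for i in range(6, 10):
--         if not text[i].isdecimal():
--             return False
--     return True
-- ===== SOURCE B (Python) =====
-- def isCellNumber(text):
--     # Match the input against the template "ddddd-dddd": 'd' accepts a decimal
--     # digit, any other template char must appear literally; the recursion
--     # succeeds only when both strings are exhausted together, so the length
--     # check is implied by the template's length.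
--     def match(s, pat):
--         if not pat:
--             return not s
--         if not s:
--             return False
--         head_ok = s[0].isdecimal() if pat[0] == 'd' else s[0] == pat[0]
--         return head_ok and match(s[1:], pat[1:])
--     return match(text, "ddddd-dddd")
-- ===== Notes on version B (the rewrite author's own statement) =====
-- stated objective: alternative
-- what changed: Replaced A's two index-driven loops (with a per-iteration separator re-check) by a data-driven recursive matcher against a ten-character template (five digit slots, a literal dash, four digit slots), where the explicit length test disappears: it is implied by the recursion consuming the template and input together.
import Mathlib
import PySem

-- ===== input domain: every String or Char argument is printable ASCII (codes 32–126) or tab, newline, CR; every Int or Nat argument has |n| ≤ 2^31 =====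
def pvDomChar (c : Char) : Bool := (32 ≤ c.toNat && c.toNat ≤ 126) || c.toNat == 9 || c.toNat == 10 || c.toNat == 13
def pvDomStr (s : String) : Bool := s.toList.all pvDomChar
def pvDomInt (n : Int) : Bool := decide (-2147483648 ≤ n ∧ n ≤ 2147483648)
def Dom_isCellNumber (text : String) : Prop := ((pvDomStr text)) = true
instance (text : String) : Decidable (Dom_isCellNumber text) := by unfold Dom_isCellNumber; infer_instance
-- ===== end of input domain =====

-- B replaces A's two index loops (with a per-iteration separator re-check) by a recursive matcher
-- against the template "ddddd-dddd"; the length test is implied by the recursion. Objective: alternative.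
-- On the ASCII domain str.isdecimal per character coincides with PySem.Chars.isdigit, used by both ports.

-- ===== PORT A =====
-- second loop of A: for i in range(6,10): if not text[i].isdecimal(): return False
def pvLoopA2 (cs : List Char) : List Int → Bool
  | [] => true
  | i :: rest =>
    if !(PySem.Chars.isdigit ((PySem.List.pyGet? cs i).getD ' ')) then false
    else pvLoopA2 cs rest

-- first loop of A: for i in range(0,5): digit check at i, then the dash check at 5, every iteration
def pvLoopA1 (cs : List Char) : List Int → Bool
  | [] => pvLoopA2 cs (PySem.List.pyRange 6 10 1)
  | i :: rest =>
    if !(PySem.Chars.isdigit ((PySem.List.pyGet? cs i).getD ' ')) then false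
    else if ((PySem.List.pyGet? cs 5).getD ' ') ≠ '-' then false
    else pvLoopA1 cs rest

def isCellNumber (text : String) : Bool :=
  let cs := text.toList
  if cs.length ≠ 10 then false
  else pvLoopA1 cs (PySem.List.pyRange 0 5 1)

-- ===== PORT B =====
-- B's recursive matcher: 'd' in the pattern accepts a digit, any other pattern char must appear literally
def pvMatch : List Char → List Char → Bool
  | s, [] => s.isEmpty
  | [], _ :: _ => false
  | c :: s, p :: ps =>
    (if p == 'd' then PySem.Chars.isdigit c else c == p) && pvMatch s ps

def isCellNumber_alt (text : String) : Bool :=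
  pvMatch text.toList "ddddd-dddd".toList

-- ===== PRECONDITION & SPEC =====
def Spec_isCellNumber (text : String) (out : Bool) : Prop := out = isCellNumber_alt text
instance (text : String) (out : Bool) : Decidable (Spec_isCellNumber text out) := by unfold Spec_isCellNumber; infer_instance

-- ===== CLAIM (what is proved, stated in full; the proofs are below) =====
def Claim_equal_isCellNumber : Prop := ∀ (text : String), Dom_isCellNumber text → Spec_isCellNumber text (isCellNumber text)

-- ===== LEMMAS AND PROOFS =====
theorem pvMatch_length_ne (s pat : List Char) (h : s.length ≠ pat.length) :
    pvMatch s pat = false := by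
  induction pat generalizing s with
  | nil => cases s with
    | nil => simp at h
    | cons c s => simp [pvMatch]
  | cons p ps ih =>
    cases s with
    | nil => simp [pvMatch]
    | cons c s =>
      simp only [pvMatch, Bool.and_eq_false_iff]
      right
      exact ih s (by simpa using h)

theorem pv_core (cs : List Char) :
    (if cs.length ≠ 10 then false else pvLoopA1 cs (PySem.List.pyRange 0 5 1))
      = pvMatch cs "ddddd-dddd".toList := by
  by_cases h : cs.length = 10
  · obtain ⟨a,b,c,d,e,f,g,h',i,j,rfl⟩ :
        ∃ a b c d e f g h' i j, cs = [a,b,c,d,e,f,g,h',i,j] := by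
      match cs, h with
      | [a,b,c,d,e,f,g,h',i,j], _ => exact ⟨a,b,c,d,e,f,g,h',i,j,rfl⟩
    simp only [show PySem.List.pyRange 0 5 1 = ([0,1,2,3,4] : List Int) from by decide,
      show PySem.List.pyRange 6 10 1 = ([6,7,8,9] : List Int) from by decide,
      pvLoopA1, pvLoopA2]
    simp [PySem.List.pyGet?, PySem.List.pyIdx?, pvMatch]
    cases PySem.Chars.isdigit a <;> cases PySem.Chars.isdigit b <;>
    cases PySem.Chars.isdigit c <;> cases PySem.Chars.isdigit d <;>
    cases PySem.Chars.isdigit e <;> by_cases h5 : f = '-' <;> simp_all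
  · rw [pvMatch_length_ne cs _ (by simpa using h)]
    simp [h]

-- ===== VERDICT (by name: the statement is the Claim_ definition above) =====
theorem isCellNumber_spec : Claim_equal_isCellNumber := by
  intro text _
  unfold Spec_isCellNumber isCellNumber isCellNumber_alt
  exact pv_core text.toList
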